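-- pv_equiv track=rewrite | github.com/chrisjsherm/Algorithmic-Thinking-Part-1-App-2 | utility_graph.py | count_edges
-- ===== SOURCE A (Python) =====
-- def count_edges(graph, is_directed=True):
--     """
--     Takes a graph and whether it is directed and returns the number of edges
--     that exist in the graph.
--
--     :param graph: Graph represented as a dictionary with nodes as the keys and
--         adjacency sets as the values.
--     :param is_directed: Boolean determining whether the graph is directed or not.
--     :returns: Integer representing the number of edges in the graph.
--     """
--     edges = set()
--     if is_directed:
--         for node in graph:
--             for edge in graph[node]:
--                 edges.add(tuple((node, edge)))
--         return len(edges)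
--
--     for node in graph:
--         for edge in graph[node]:
--             if is_directed:
--                 # Tuples maintain order, which is good for directed edges.
--                 edges.add(tuple((node, edge)))
--             else:
--                 # Sets do not consider order, which is good for undirected edges.
--                 # We need to use a frozenset to indicate it is immutable and can
--                 # be hashed by the outer set we're adding it to.
--                 edges.add(frozenset((node, edge)))
--     return len(edges)
-- ===== SOURCE B (Python) =====
-- def count_edges(graph, is_directed=True):
--     """Count distinct edges by flatten -> sort -> scan: list every adjacency
--     pair (normalized to ascending order when undirected), sort the list, and
--     count the positions where the pair differs from its predecessor."""
--     if is_directed: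
--         pairs = [(node, edge) for node, adjacent in graph.items() for edge in adjacent]
--     else:
--         pairs = [(node, edge) if node <= edge else (edge, node)
--                  for node, adjacent in graph.items() for edge in adjacent]
--     pairs.sort()
--     count = 0
--     prev = None
--     for p in pairs:
--         if p != prev:
--             count += 1
--             prev = p
--     return count
-- ===== Notes on version B (the rewrite author's own statement) =====
-- stated objective: alternative
-- what changed: Replaces A's hash-set accumulation with a flatten-sort-scan: build the flat list of (normalized) edge pairs, sort it, and count positions where a pair differs from its predecessor; no set is ever built.
import Mathlib
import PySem

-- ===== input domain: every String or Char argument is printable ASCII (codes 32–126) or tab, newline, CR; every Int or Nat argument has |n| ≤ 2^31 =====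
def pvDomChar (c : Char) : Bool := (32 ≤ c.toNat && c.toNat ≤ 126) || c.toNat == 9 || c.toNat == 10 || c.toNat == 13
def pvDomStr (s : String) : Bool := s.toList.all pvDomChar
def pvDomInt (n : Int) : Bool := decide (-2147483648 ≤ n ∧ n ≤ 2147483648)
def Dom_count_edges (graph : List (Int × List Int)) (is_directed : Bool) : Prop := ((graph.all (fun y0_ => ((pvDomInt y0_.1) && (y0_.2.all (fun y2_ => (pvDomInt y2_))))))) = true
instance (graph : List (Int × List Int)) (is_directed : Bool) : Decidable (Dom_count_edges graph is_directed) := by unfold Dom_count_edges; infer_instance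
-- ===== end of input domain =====

-- B replaces A's hash-set accumulation with flatten -> sort -> linear scan: it lists every
-- (normalized) adjacency pair, sorts the list, and counts adjacent changes. Alternative algorithm, same result.


-- ===== PORT A =====
-- Edge-set elements: Python tuples (Sum.inl) and frozensets (Sum.inr, compared as sets).
-- pvEqE is Python '==' on those elements: tuples compare componentwise, frozensets as sets,
-- a tuple never equals a frozenset (exact hand port of frozenset equality).
def pvEqE : ((Int × Int) ⊕ (List Int)) → ((Int × Int) ⊕ (List Int)) → Bool
  | Sum.inl p, Sum.inl q => p == q
  | Sum.inr s, Sum.inr t => (s.all fun x => t.contains x) && (t.all fun x => s.contains x)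
  | _, _ => false

-- set.add under pvEqE-equality (first occurrence kept)
def pvAddE (es : List ((Int × Int) ⊕ (List Int))) (x : (Int × Int) ⊕ (List Int)) :
    List ((Int × Int) ⊕ (List Int)) :=
  if es.any (fun y => pvEqE x y) then es else es ++ [x]

-- frozenset((a, b)) as its list of distinct elements
def pvFS (a b : Int) : List Int := if a == b then [a] else [a, b]

-- graph[node] is looked up with node a key of graph, so the [] default of getD is never used (exact).
def count_edges (graph : List (Int × List Int)) (is_directed : Bool) : Int :=
  if is_directed then
    (((graph.map Prod.fst).foldl
        (fun edges node =>
          ((PySem.Dict.mk graph).getD node []).foldl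
            (fun edges edge => pvAddE edges (Sum.inl (node, edge))) edges)
        []).length : Int)
  else
    (((graph.map Prod.fst).foldl
        (fun edges node =>
          ((PySem.Dict.mk graph).getD node []).foldl
            (fun edges edge =>
              if is_directed then pvAddE edges (Sum.inl (node, edge))
              else pvAddE edges (Sum.inr (pvFS node edge))) edges)
        []).length : Int)

-- ===== PORT B =====
-- pairs.sort(): Python compares int 2-tuples lexicographically, so the sort is ported as the
-- stable PySem sort with the lexicographic key 'toLex' (exact on pairs of ints).
def count_edges_alt (graph : List (Int × List Int)) (is_directed : Bool) : Int :=
  let pairs :=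
    if is_directed then
      graph.flatMap (fun p => p.2.map (fun e => (p.1, e)))
    else
      graph.flatMap (fun p => p.2.map (fun e => if p.1 ≤ e then (p.1, e) else (e, p.1)))
  let sortedPairs := PySem.List.sorted pairs (fun x => toLex x) false
  (sortedPairs.foldl
      (fun s p => if some p ≠ s.2 then (s.1 + 1, some p) else s)
      ((0 : Int), (none : Option (Int × Int)))).1

-- ===== PRECONDITION & SPEC =====
-- Pre_ restricts graph to association lists with pairwise-distinct keys: these are exactly the
-- lists that represent a Python dict (A's parameter is a dict, which cannot hold duplicate keys).
def Pre_count_edges (graph : List (Int × List Int)) (is_directed : Bool) : Prop :=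
  (graph.map Prod.fst).Nodup
instance (graph : List (Int × List Int)) (is_directed : Bool) : Decidable (Pre_count_edges graph is_directed) := by unfold Pre_count_edges; infer_instance

def pvWitness_count_edges : (List (Int × List Int)) × Bool := ([(1, [2, 3]), (2, [1])], true)

def Spec_count_edges (graph : List (Int × List Int)) (is_directed : Bool) (out : Int) : Prop := out = count_edges_alt graph is_directed
instance (graph : List (Int × List Int)) (is_directed : Bool) (out : Int) : Decidable (Spec_count_edges graph is_directed out) := by unfold Spec_count_edges; infer_instance

-- ===== CLAIM (what is proved, stated in full; the proofs are below) =====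
def Claim_equal_count_edges : Prop := ∀ (graph : List (Int × List Int)) (is_directed : Bool), Dom_count_edges graph is_directed → Pre_count_edges graph is_directed → Spec_count_edges graph is_directed (count_edges graph is_directed)

-- ===== LEMMAS AND PROOFS =====

-- the (node, edge) pairs the nested loops of A enumerate, in order
def pvPairs (g : List (Int × List Int)) : List (Int × Int) :=
  g.flatMap (fun p => p.2.map (fun e => (p.1, e)))

theorem pv_flatten {σ : Type} (f : σ → (Int × Int) → σ) :
    ∀ (g : List (Int × List Int)) (s : σ),
      g.foldl (fun s p => p.2.foldl (fun s e => f s (p.1, e)) s) s = (pvPairs g).foldl f s := by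
  intro g
  induction g with
  | nil => intro s; rfl
  | cons p rest ih =>
      intro s
      simp only [pvPairs, List.flatMap_cons, List.foldl_cons, List.foldl_append, List.foldl_map]
      rw [ih]
      simp [pvPairs]

theorem pv_keysfold {σ : Type} (F : σ → Int → List Int → σ) (g : List (Int × List Int))
    (h : (g.map Prod.fst).Nodup) (s : σ) :
    (g.map Prod.fst).foldl (fun s n => F s n ((PySem.Dict.mk g).getD n [])) s
      = g.foldl (fun s p => F s p.1 p.2) s := by
  rw [List.foldl_map]
  apply PySem.List.foldl_congr_mem
  intro acc p hp
  have hget : (PySem.Dict.mk g).getD p.1 [] = p.2 := by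
    apply PySem.Dict.getD_of_mem_items (k := p.1) (v := p.2)
    · simpa using hp
    · rw [PySem.Dict.keys_mk]; exact h
  rw [hget]

-- frozenset equality coincides with equality of normalized (min,max) pairs
theorem pv_fsEq (a b c d : Int) :
    pvEqE (Sum.inr (pvFS a b)) (Sum.inr (pvFS c d))
      = ((min a b, max a b) == ((min c d, max c d) : Int × Int)) := by
  rcases eq_or_ne a b with h1 | h1 <;> rcases eq_or_ne c d with h2 | h2 <;>
    simp only [pvEqE, pvFS, h1, h2] <;>
    rw [Bool.eq_iff_iff] <;>
    simp_all [Prod.ext_iff] <;>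
    omega

-- simulation: A's fold with pvAddE/mk and a Set.add fold with key grow in lock-step
theorem pv_sim (mk : (Int × Int) → ((Int × Int) ⊕ (List Int))) (key : (Int × Int) → Int × Int)
    (hk : ∀ x y, pvEqE (mk x) (mk y) = (key x == key y)) :
    ∀ (L : List (Int × Int)) (fs : List ((Int × Int) ⊕ (List Int))) (ps : List (Int × Int)),
      (∀ x, fs.any (fun y => pvEqE (mk x) y) = ps.contains (key x)) →
      (L.foldl (fun ed x => pvAddE ed (mk x)) fs).length + ps.length
        = (L.foldl (fun s x => PySem.Set.add s (key x)) ps).length + fs.length := by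
  intro L
  induction L with
  | nil => intro fs ps _; simp only [List.foldl_nil]; omega
  | cons x L ih =>
      intro fs ps hinv
      simp only [List.foldl_cons]
      by_cases hm : key x ∈ ps
      · rw [show pvAddE fs (mk x) = fs by simp [pvAddE, hinv x, hm],
            show PySem.Set.add ps (key x) = ps by simp [PySem.Set.add, hm]]
        exact ih fs ps hinv
      · rw [show pvAddE fs (mk x) = fs ++ [mk x] by simp [pvAddE, hinv x, hm],
            show PySem.Set.add ps (key x) = ps ++ [key x] by simp [PySem.Set.add, hm]]
        have := ih (fs ++ [mk x]) (ps ++ [key x]) (by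
          intro y
          simp only [List.any_append, List.any_cons, List.any_nil, Bool.or_false,
            List.contains_append, hinv y, hk]
          by_cases h : key y = key x <;> simp [h])
        simp only [List.length_append, List.length_singleton] at this ⊢
        omega

-- A's value is the number of distinct keyed pairs
theorem pv_A_len (mk : (Int × Int) → ((Int × Int) ⊕ (List Int))) (key : (Int × Int) → Int × Int)
    (hk : ∀ x y, pvEqE (mk x) (mk y) = (key x == key y)) (L : List (Int × Int)) :
    (L.foldl (fun ed x => pvAddE ed (mk x)) []).length = (L.map key).toFinset.card := by
  have hs := pv_sim mk key hk L [] [] (fun x => rfl)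
  simp only [List.length_nil, Nat.add_zero] at hs
  have hof : (L.foldl (fun s x => PySem.Set.add s (key x)) ([] : List (Int × Int)))
      = PySem.Set.ofList (L.map key) := by
    rw [PySem.Set.ofList_eq_foldl, List.foldl_map]
  rw [hof] at hs
  rw [hs]
  have hnd : (PySem.Set.ofList (L.map key)).Nodup := PySem.Set.nodup_ofList _
  have hfs : (PySem.Set.ofList (L.map key)).toFinset = (L.map key).toFinset := by
    apply Finset.ext
    intro a
    simp [List.mem_toFinset, PySem.Set.mem_ofList]
  rw [← hfs, List.toFinset_card_of_nodup hnd]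

-- scan over a sorted run: counting adjacent changes counts the distinct elements ≠ the previous one
theorem pv_cnt_run :
    ∀ (M : List (Int × Int)) (q : Int × Int) (c : Int),
      M.Pairwise (fun a b => toLex a ≤ toLex b) → (∀ y ∈ M, toLex q ≤ toLex y) →
      (M.foldl (fun s p => if some p ≠ s.2 then (s.1 + 1, some p) else s) (c, some q)).1
        = c + ((M.toFinset.erase q).card : Int) := by
  intro M
  induction M with
  | nil => intro q c _ _; simp
  | cons x xs ih =>
      intro q c hpw hq
      have hpw' : xs.Pairwise (fun a b => toLex a ≤ toLex b) := hpw.tail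
      have hx : ∀ y ∈ xs, toLex x ≤ toLex y := by
        intro y hy; exact List.rel_of_pairwise_cons hpw hy
      by_cases hxq : x = q
      · subst hxq
        simp only [List.foldl_cons, ne_eq, not_true_eq_false, if_false]
        rw [ih x c hpw' hx]
        congr 2
        rw [List.toFinset_cons, Finset.erase_insert_eq_erase]
      · have hnot : q ∉ (x :: xs) := by
          intro hmem
          rcases List.mem_cons.mp hmem with h | h
          · exact hxq h.symm
          · have h1 : toLex x ≤ toLex q := hx q h
            have h2 : toLex q ≤ toLex x := hq x (by simp)
            exact hxq (toLex.injective (le_antisymm h2 h1)).symm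
        simp only [List.foldl_cons]
        rw [if_pos (by simp [Option.some.injEq]; exact fun h => hxq h)]
        rw [ih x (c + 1) hpw' hx]
        have hqe : ((x :: xs).toFinset.erase q) = (x :: xs).toFinset := by
          apply Finset.erase_eq_of_notMem
          simpa [List.mem_toFinset] using hnot
        rw [hqe, List.toFinset_cons]
        have : (insert x xs.toFinset).card = (xs.toFinset.erase x).card + 1 := by
          by_cases hxm : x ∈ xs.toFinset
          · conv_lhs => rw [← Finset.insert_erase hxm]
            rw [Finset.insert_idem, Finset.card_insert_of_notMem (Finset.notMem_erase _ _)]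
          · rw [Finset.card_insert_of_notMem hxm, Finset.erase_eq_of_notMem hxm]
        rw [this]
        push_cast
        ring

-- full scan: on a lexicographically sorted list the change count is the number of distinct elements
theorem pv_cnt (M : List (Int × Int)) (hpw : M.Pairwise (fun a b => toLex a ≤ toLex b)) :
    (M.foldl (fun s p => if some p ≠ s.2 then (s.1 + 1, some p) else s)
        ((0 : Int), (none : Option (Int × Int)))).1 = (M.toFinset.card : Int) := by
  cases M with
  | nil => simp
  | cons x xs =>
      simp only [List.foldl_cons, ne_eq, reduceCtorEq, not_false_eq_true, if_pos, zero_add]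
      have hx : ∀ y ∈ xs, toLex x ≤ toLex y := by
        intro y hy; exact List.rel_of_pairwise_cons hpw hy
      rw [pv_cnt_run xs x 1 hpw.tail hx]
      rw [List.toFinset_cons]
      have : (insert x xs.toFinset).card = (xs.toFinset.erase x).card + 1 := by
        by_cases hxm : x ∈ xs.toFinset
        · conv_lhs => rw [← Finset.insert_erase hxm]
          rw [Finset.insert_idem, Finset.card_insert_of_notMem (Finset.notMem_erase _ _)]
        · rw [Finset.card_insert_of_notMem hxm, Finset.erase_eq_of_notMem hxm]
      rw [this]
      push_cast
      ring

-- B's value on the flat pair list L is the number of distinct elements of L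
theorem pv_B_len (L : List (Int × Int)) :
    ((PySem.List.sorted L (fun x => toLex x) false).foldl
        (fun s p => if some p ≠ s.2 then (s.1 + 1, some p) else s)
        ((0 : Int), (none : Option (Int × Int)))).1 = (L.toFinset.card : Int) := by
  rw [pv_cnt _ (PySem.List.sorted_pairwise L (fun x => toLex x)),
      List.toFinset_eq_of_perm _ _ (PySem.List.sorted_perm L (fun x => toLex x) false)]

-- the normalized comprehension is the (min,max) image of the raw pair list
theorem pv_norm_pairs (g : List (Int × List Int)) :
    g.flatMap (fun p => p.2.map (fun e => if p.1 ≤ e then (p.1, e) else (e, p.1)))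
      = (pvPairs g).map (fun x => (min x.1 x.2, max x.1 x.2)) := by
  simp only [pvPairs, List.map_flatMap, List.map_map]
  apply List.flatMap_congr  -- congruence over the outer flatMap
  intro p _
  apply List.map_congr_left
  intro e _
  simp only [Function.comp_apply]
  rcases le_total p.1 e with h | h
  · rw [if_pos h]
    simp [min_eq_left h, max_eq_right h]
  · by_cases he : p.1 ≤ e
    · rw [if_pos he]; simp [min_eq_left he, max_eq_right he]
    · rw [if_neg he]
      have := lt_of_not_ge he
      simp [min_eq_right h, max_eq_left h]

-- ===== VERDICT (by name: the statement is the Claim_ definition above) =====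
theorem count_edges_spec : Claim_equal_count_edges := by
  intro graph is_directed _ hpre
  have hpre' : (graph.map Prod.fst).Nodup := hpre
  show count_edges graph is_directed = count_edges_alt graph is_directed
  cases is_directed with
  | true =>
      simp only [count_edges, count_edges_alt, if_true]
      rw [pv_keysfold (F := fun s n l =>
            l.foldl (fun ed e => pvAddE ed (Sum.inl (n, e))) s) graph hpre',
          pv_flatten (f := fun ed x => pvAddE ed (Sum.inl x)) graph []]
      rw [pv_A_len Sum.inl (fun x => x) (fun x y => rfl) (pvPairs graph)]
      rw [pv_B_len (graph.flatMap (fun p => p.2.map (fun e => (p.1, e))))]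
      simp [pvPairs]
  | false =>
      simp only [count_edges, count_edges_alt, Bool.false_eq_true, if_false]
      rw [pv_keysfold (F := fun s n l =>
            l.foldl (fun ed e => pvAddE ed (Sum.inr (pvFS n e))) s) graph hpre',
          pv_flatten (f := fun ed x => pvAddE ed (Sum.inr (pvFS x.1 x.2))) graph []]
      rw [pv_A_len (fun x => Sum.inr (pvFS x.1 x.2)) (fun x => (min x.1 x.2, max x.1 x.2))
            (fun x y => pv_fsEq x.1 x.2 y.1 y.2) (pvPairs graph)]
      rw [pv_norm_pairs graph]
      rw [pv_B_len ((pvPairs graph).map (fun x => (min x.1 x.2, max x.1 x.2)))]
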